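-- pv_equiv track=rewrite | github.com/thetwoj/advent-of-code-2020 | day06/answer_checker.py | unanimous_answers
-- ===== SOURCE A (Python) =====
-- def unanimous_answers(inputs):
--     # Doing this with set intersections would have been easier
--     # since that's effectively what I manually implemented
--     answers = []
--     current_group = set()
--     next_first = True
--     for line in inputs:
--         if line == "":
--             answers.append(current_group)
--             current_group = set()
--             next_first = True
--             continue
--
--         if next_first:
--             for answer in line:
--                 current_group.add(answer)
--         else:
--             to_remove = []
--             for answer in current_group:
--                 if answer not in line:
--                     to_remove.append(answer)
--             for answer in to_remove:
--                 current_group.remove(answer)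
--         next_first = False
--     answers.append(current_group)
--     return answers
-- ===== SOURCE B (Python) =====
-- def unanimous_answers(inputs):
--     # Split into groups of lines first, then intersect per group.
--     groups = []
--     current = []
--     for line in inputs:
--         if line == "":
--             groups.append(current)
--             current = []
--         else:
--             current.append(line)
--     groups.append(current)
--     result = []
--     for group in groups:
--         if not group:
--             result.append(set())
--         else:
--             common = set(group[0])
--             for line in group[1:]:
--                 common &= set(line)
--             result.append(common)
--     return result
-- ===== Notes on version B (the rewrite author's own statement) =====
-- stated objective: simpler
-- what changed: B first splits the input into groups of lines and then computes each group's answer as a plain set intersection, instead of A's single pass that interleaves group tracking with a hand-rolled add/scan/remove intersection on a mutable set.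
import Mathlib
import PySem

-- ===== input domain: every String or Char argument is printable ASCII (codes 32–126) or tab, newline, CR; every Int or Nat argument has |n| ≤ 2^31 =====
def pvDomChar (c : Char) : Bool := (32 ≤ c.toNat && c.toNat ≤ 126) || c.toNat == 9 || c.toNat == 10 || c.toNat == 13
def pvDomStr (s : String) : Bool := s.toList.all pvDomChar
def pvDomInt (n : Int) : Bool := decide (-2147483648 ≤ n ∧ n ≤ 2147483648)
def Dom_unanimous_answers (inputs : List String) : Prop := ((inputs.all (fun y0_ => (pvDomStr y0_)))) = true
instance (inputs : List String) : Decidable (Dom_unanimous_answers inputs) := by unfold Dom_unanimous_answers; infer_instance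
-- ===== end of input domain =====

-- B splits the input into groups of lines first and then intersects per group (simpler
-- decomposition); A does one interleaved pass with a hand-rolled set intersection.


-- ===== PORT A =====
-- Python iterates `for answer in current_group` in hash order to build to_remove; the
-- removals commute, so the resulting SET is exact (PySem.Set stores insertion order).
def uaStep (st : List (List String) × List String × Bool) (line : String) :
    List (List String) × List String × Bool :=
  if line == "" then (st.1 ++ [st.2.1], PySem.Set.empty, true)
  else
    let cg :=
      if st.2.2 then
        -- for answer in line: current_group.add(answer)
        line.toList.foldl (fun s c => PySem.Set.add s (String.ofList [c])) st.2.1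
      else
        let toRemove := st.2.1.foldl
          (fun tr a => if (!PySem.Str.isIn a line) = true then tr ++ [a] else tr) []
        toRemove.foldl (fun s a => PySem.Set.discard s a) st.2.1
    (st.1, cg, false)

def unanimous_answers (inputs : List String) : List (List String) :=
  let st := inputs.foldl uaStep ([], PySem.Set.empty, true)
  st.1 ++ [st.2.1]

-- ===== PORT B =====
def uaSplitStep (st : List (List String) × List String) (line : String) :
    List (List String) × List String :=
  if line == "" then (st.1 ++ [st.2], []) else (st.1, st.2 ++ [line])

-- set(line): the distinct one-character strings of line, in first-occurrence order
def uaLineSet (line : String) : PySem.Set String :=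
  PySem.Set.ofList (line.toList.map (fun c => String.ofList [c]))

def uaInter : List String → List String
  | [] => PySem.Set.empty
  | h :: t => t.foldl (fun common line => PySem.Set.inter common (uaLineSet line)) (uaLineSet h)

def unanimous_answers_alt (inputs : List String) : List (List String) :=
  let fin := inputs.foldl uaSplitStep ([], [])
  (fin.1 ++ [fin.2]).map uaInter

-- ===== PRECONDITION & SPEC =====
def Spec_unanimous_answers (inputs : List String) (out : List (List String)) : Prop := out = unanimous_answers_alt inputs
instance (inputs : List String) (out : List (List String)) : Decidable (Spec_unanimous_answers inputs out) := by unfold Spec_unanimous_answers; infer_instance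

-- ===== CLAIM (what is proved, stated in full; the proofs are below) =====
def Claim_equal_unanimous_answers : Prop := ∀ (inputs : List String), Dom_unanimous_answers inputs → Spec_unanimous_answers inputs (unanimous_answers inputs)

-- ===== LEMMAS AND PROOFS =====

-- membership of a one-character string in set(line) is Python's substring test on line
lemma mem_uaLineSet (c : Char) (line : String) :
    String.ofList [c] ∈ uaLineSet line ↔ PySem.Str.isIn (String.ofList [c]) line = true := by
  rw [uaLineSet, PySem.Set.mem_ofList, PySem.Str.isIn_iff_infix]
  simp [List.singleton_infix_iff, String.ofList_inj]

lemma foldl_inter_sublist (t : List String) (s : PySem.Set String) (a : String)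
    (h : a ∈ t.foldl (fun common line => PySem.Set.inter common (uaLineSet line)) s) :
    a ∈ s := by
  induction t generalizing s with
  | nil => exact h
  | cons x xs ih =>
    have := ih _ h
    simpa [PySem.Set.inter, List.mem_filter] using (List.mem_filter.mp this).1

lemma onechar_uaInter (g : List String) (a : String) (h : a ∈ uaInter g) :
    ∃ c, a = String.ofList [c] := by
  cases g with
  | nil => cases h
  | cons hd t =>
    have : a ∈ uaLineSet hd := foldl_inter_sublist t _ a h
    rw [uaLineSet, PySem.Set.mem_ofList] at this
    obtain ⟨c, _, hc⟩ := List.mem_map.mp this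
    exact ⟨c, hc.symm⟩

lemma foldl_discard_eq_filter (r : List String) (s : PySem.Set String) :
    r.foldl (fun s a => PySem.Set.discard s a) s = s.filter (fun y => !r.contains y) := by
  induction r generalizing s with
  | nil => simp
  | cons x xs ih =>
    rw [List.foldl_cons, ih, PySem.Set.discard, List.filter_filter]
    refine List.filter_congr (fun y _ => ?_)
    by_cases h : y = x
    · simp [h]
    · simp [h]

-- the scan-and-remove phase of A is exactly intersection with set(line)
lemma remove_eq_inter (s : List String) (line : String)
    (h : ∀ a ∈ s, ∃ c, a = String.ofList [c]) :
    (s.foldl (fun tr a => if (!PySem.Str.isIn a line) = true then tr ++ [a] else tr)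
        []).foldl (fun s a => PySem.Set.discard s a) s
      = PySem.Set.inter s (uaLineSet line) := by
  have htr : s.foldl (fun tr a => if (!PySem.Str.isIn a line) = true then tr ++ [a] else tr) []
      = s.filter (fun a => !PySem.Str.isIn a line) := by
    simpa using PySem.List.foldl_append_if (fun a => !PySem.Str.isIn a line) id s []
  rw [htr, foldl_discard_eq_filter, PySem.Set.inter]
  refine List.filter_congr (fun y hy => ?_)
  obtain ⟨c, rfl⟩ := h y hy
  rw [Bool.eq_iff_iff]
  simp [List.mem_filter, hy, mem_uaLineSet]

lemma uaInter_append_singleton (cur : List String) (line : String) (h : cur ≠ []) :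
    uaInter (cur ++ [line]) = PySem.Set.inter (uaInter cur) (uaLineSet line) := by
  cases cur with
  | nil => exact absurd rfl h
  | cons hd t => simp [uaInter, List.foldl_append]

lemma ua_main (inputs : List String) : ∀ (gs : List (List String)) (cur : List String),
    inputs.foldl uaStep (gs.map uaInter, uaInter cur, cur.isEmpty)
      = ((inputs.foldl uaSplitStep (gs, cur)).1.map uaInter,
         uaInter (inputs.foldl uaSplitStep (gs, cur)).2,
         (inputs.foldl uaSplitStep (gs, cur)).2.isEmpty) := by
  induction inputs with
  | nil => intro gs cur; rfl
  | cons line rest ih =>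
    intro gs cur
    by_cases hl : line = ""
    · have h1 : uaStep (gs.map uaInter, uaInter cur, cur.isEmpty) line
          = ((gs ++ [cur]).map uaInter, uaInter ([] : List String), ([] : List String).isEmpty) := by
        simp [uaStep, hl, uaInter, PySem.Set.empty]
      have h2 : uaSplitStep (gs, cur) line = (gs ++ [cur], []) := by
        simp [uaSplitStep, hl]
      simp only [List.foldl_cons, h1, h2, ih]
    · cases cur with
      | nil =>
        have hset : line.toList.foldl (fun s c => PySem.Set.add s (String.ofList [c]))
            ([] : List String) = uaLineSet line := by
          rw [uaLineSet, ← PySem.Set.update_nil_left, PySem.Set.update_map_eq_foldl_add]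
        have h1 : uaStep (gs.map uaInter, uaInter [], ([] : List String).isEmpty) line
            = (gs.map uaInter, uaInter [line], [line].isEmpty) := by
          simp [uaStep, hl, uaInter, PySem.Set.empty, hset]
        have h2 : uaSplitStep (gs, []) line = (gs, [line]) := by
          simp [uaSplitStep, hl]
        simp only [List.foldl_cons, h1, h2, ih]
      | cons hd t =>
        have hrem := remove_eq_inter (uaInter (hd :: t)) line (onechar_uaInter (hd :: t))
        have h1 : uaStep (gs.map uaInter, uaInter (hd :: t), (hd :: t).isEmpty) line
            = (gs.map uaInter, uaInter ((hd :: t) ++ [line]), ((hd :: t) ++ [line]).isEmpty) := by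
          rw [uaStep, if_neg (show ¬((line == "") = true) by simp [hl])]
          simp only [List.isEmpty_cons, Bool.false_eq_true, if_false]
          rw [hrem, ← uaInter_append_singleton (hd :: t) line (by simp)]
          simp
        have h2 : uaSplitStep (gs, hd :: t) line = (gs, (hd :: t) ++ [line]) := by
          simp [uaSplitStep, hl]
        simp only [List.foldl_cons, h1, h2, ih]

-- ===== VERDICT (by name: the statement is the Claim_ definition above) =====
theorem unanimous_answers_spec : Claim_equal_unanimous_answers := by
  intro inputs _
  unfold Spec_unanimous_answers unanimous_answers unanimous_answers_alt
  have := ua_main inputs [] []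
  simp only [List.map_nil, List.isEmpty_nil] at this
  rw [show (PySem.Set.empty : List String) = uaInter [] from rfl, this]
  simp
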